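-- pv_equiv track=rewrite | github.com/yzlu0917/apg | civic-prm/src/civic_prm/domains/blocksworld.py | _shortest_plan
-- ===== SOURCE A (Python) =====
-- from collections import deque
--
-- def _canonicalize(state: tuple[tuple[str, ...], ...]) -> tuple[tuple[str, ...], ...]:
--     cleaned = [stack for stack in state if stack]
--     return tuple(sorted(cleaned, key=lambda stack: "".join(stack)))
--
-- def _moves(
--     state: tuple[tuple[str, ...], ...],
--     blocks: tuple[str, ...] | None = None,
-- ) -> list[tuple[str, tuple[tuple[str, ...], ...]]]:
--     results = []
--     for src_index, src_stack in enumerate(state):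
--         block = src_stack[-1]
--         base = [list(stack) for stack in state]
--         base[src_index].pop()
--         for dst_index, dst_stack in enumerate(state):
--             if src_index == dst_index:
--                 continue
--             candidate = [stack[:] for stack in base]
--             candidate[dst_index].append(block)
--             next_state = _canonicalize(tuple(tuple(stack) for stack in candidate))
--             action = f"move block {block} onto block {dst_stack[-1]}"
--             results.append((action, next_state))
--         candidate = [stack[:] for stack in base]
--         candidate.append([block])
--         next_state = _canonicalize(tuple(tuple(stack) for stack in candidate))
--         if next_state == state:
--             continue
--         action = f"move block {block} to the table"
--         results.append((action, next_state))
--     dedup = {}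
--     for action, next_state in results:
--         dedup[(action, next_state)] = None
--     return list(dedup.keys())
--
-- def _shortest_plan(
--     start: tuple[tuple[str, ...], ...],
--     goal: tuple[tuple[str, ...], ...],
--     blocks: tuple[str, ...],
-- ) -> list[tuple[str, tuple[tuple[str, ...], ...]]]:
--     queue = deque([(start, [])])
--     seen = {start}
--     while queue:
--         state, path = queue.popleft()
--         if state == goal:
--             return path
--         for action, next_state in _moves(state, blocks):
--             if next_state in seen:
--                 continue
--             seen.add(next_state)
--             queue.append((next_state, path + [(action, next_state)]))
--     raise ValueError("goal is unreachable")
-- ===== SOURCE B (Python) =====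
-- from collections import deque
--
--
-- def _canonicalize(state):
--     cleaned = [stack for stack in state if stack]
--     return tuple(sorted(cleaned, key=lambda stack: "".join(stack)))
--
--
-- def _moves(state, blocks=None):
--     results = []
--     for src_index, src_stack in enumerate(state):
--         block = src_stack[-1]
--         base = [list(stack) for stack in state]
--         base[src_index].pop()
--         for dst_index, dst_stack in enumerate(state):
--             if src_index == dst_index:
--                 continue
--             candidate = [stack[:] for stack in base]
--             candidate[dst_index].append(block)
--             next_state = _canonicalize(tuple(tuple(stack) for stack in candidate))
--             action = f"move block {block} onto block {dst_stack[-1]}"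
--             results.append((action, next_state))
--         candidate = [stack[:] for stack in base]
--         candidate.append([block])
--         next_state = _canonicalize(tuple(tuple(stack) for stack in candidate))
--         if next_state == state:
--             continue
--         action = f"move block {block} to the table"
--         results.append((action, next_state))
--     dedup = {}
--     for action, next_state in results:
--         dedup[(action, next_state)] = None
--     return list(dedup.keys())
--
--
-- def _shortest_plan(start, goal, blocks):
--     # Same BFS order, but the queue holds only states; each state's plan is
--     # reconstructed at the end from a predecessor table.
--     queue = deque([start])
--     seen = {start}
--     predecessor = {}
--     while queue:
--         state = queue.popleft()
--         if state == goal: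
--             plan = []
--             cur = state
--             while cur != start:
--                 action, prev = predecessor[cur]
--                 plan.append((action, cur))
--                 cur = prev
--             plan.reverse()
--             return plan
--         for action, next_state in _moves(state, blocks):
--             if next_state in seen:
--                 continue
--             seen.add(next_state)
--             predecessor[next_state] = (action, state)
--             queue.append(next_state)
--     raise ValueError("goal is unreachable")
-- ===== Notes on version B (the rewrite author's own statement) =====
-- stated objective: alternative
-- what changed: The BFS queue no longer carries a growing copy of the plan with every entry; B stores only states, records a predecessor table (state -> (action, previous state)) when a state is first seen, and reconstructs the plan by walking predecessors back from the goal and reversing, instead of A's path-per-queue-entry copying.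
import Mathlib
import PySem

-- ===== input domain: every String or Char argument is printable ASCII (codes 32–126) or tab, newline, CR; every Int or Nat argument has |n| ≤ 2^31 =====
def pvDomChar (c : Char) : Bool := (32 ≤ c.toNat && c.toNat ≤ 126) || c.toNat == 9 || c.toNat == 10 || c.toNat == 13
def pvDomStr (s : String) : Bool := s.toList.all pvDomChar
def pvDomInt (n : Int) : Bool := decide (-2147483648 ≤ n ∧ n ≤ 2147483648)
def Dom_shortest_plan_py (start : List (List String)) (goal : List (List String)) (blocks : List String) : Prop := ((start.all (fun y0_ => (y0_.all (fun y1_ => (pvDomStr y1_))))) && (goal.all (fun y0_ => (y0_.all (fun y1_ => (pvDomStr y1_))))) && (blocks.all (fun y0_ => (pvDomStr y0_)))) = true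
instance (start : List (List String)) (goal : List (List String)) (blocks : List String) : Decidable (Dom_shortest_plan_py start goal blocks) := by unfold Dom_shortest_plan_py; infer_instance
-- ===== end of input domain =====

-- B replaces A's per-queue-entry path copies by a predecessor table from which the plan is
-- reconstructed once the goal is popped (objective: alternative bookkeeping, same BFS order).
-- Both ports run the BFS loop on a large fuel ((n+2)^(2n+4) iterations, n = number of blocks
-- of `start`) as a totality guard only: inside Pre_ the Python BFS returns well within it.

-- ===== PORT A =====
-- shared helper: _canonicalize (drop empty stacks, stable-sort by the joined-string key)
def pvCanon (s : List (List String)) : List (List String) :=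
  let cleaned := s.filter (fun stack => !stack.isEmpty)
  PySem.List.sorted cleaned (fun stack => PySem.Str.join "" stack) false

-- shared helper: _moves.  stack[-1] / stack.pop() are taken via pyGetD / dropLast; the defaults
-- are never reached on states whose stacks are all nonempty (everywhere inside Pre_).
def pvMoves (state : List (List String)) : List (String × List (List String)) :=
  let results :=
    (PySem.List.enumerate state).foldl (fun (results : List (String × List (List String))) si =>
      let srcIndex := si.1
      let srcStack := si.2
      let block := PySem.List.pyGetD srcStack (-1) ""
      let base := PySem.List.pySetD state srcIndex srcStack.dropLast
      let results :=
        (PySem.List.enumerate state).foldl (fun (results : List (String × List (List String))) di =>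
          if srcIndex = di.1 then results
          else
            let candidate := PySem.List.pySetD base di.1 (PySem.List.pyGetD base di.1 [] ++ [block])
            let nextState := pvCanon candidate
            let action := "move block " ++ block ++ " onto block " ++ PySem.List.pyGetD di.2 (-1) ""
            results ++ [(action, nextState)]) results
      let candidate := base ++ [[block]]
      let nextState := pvCanon candidate
      if nextState = state then results
      else results ++ [("move block " ++ block ++ " to the table", nextState)]) []
  PySem.List.dedup results  -- dict.fromkeys-style ordered dedup

-- the body of A's `for action, next_state in _moves(state, blocks)` loop
def pvStepA (path : List (String × List (List String)))
    (acc : List (List (List String) × List (String × List (List String))) ×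
           PySem.Set (List (List String)))
    (m : String × List (List String)) :
    List (List (List String) × List (String × List (List String))) ×
    PySem.Set (List (List String)) :=
  if PySem.Set.contains acc.2 m.2 then acc
  else (acc.1 ++ [(m.2, path ++ [m])], PySem.Set.add acc.2 m.2)

-- the BFS while-loop of A; the `0` fuel and empty-queue (Python: ValueError) branches return []
def pvBfsA (goal : List (List String)) :
    Nat → List (List (List String) × List (String × List (List String))) →
    PySem.Set (List (List String)) → List (String × List (List String))
  | 0, _, _ => []
  | _ + 1, [], _ => []
  | fuel + 1, (state, path) :: rest, seen =>
    if state = goal then path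
    else
      let step := (pvMoves state).foldl (pvStepA path) (rest, seen)
      pvBfsA goal fuel step.1 step.2

def shortest_plan_py (start : List (List String)) (goal : List (List String)) (blocks : List String) : List (String × List (List String)) :=
  let n := (start.map List.length).sum
  pvBfsA goal ((n + 2) ^ (2 * n + 4)) [(start, [])] (PySem.Set.ofList [start])

-- ===== PORT B =====
-- plan reconstruction: walk the predecessor table from the goal back to start, then reverse;
-- the fuel pred.size + 1 is a totality guard (the chain visits distinct keys of pred)
def pvWalk (start : List (List String)) (pred : PySem.Dict (List (List String)) (String × List (List String))) :
    Nat → List (List String) → List (String × List (List String)) → List (String × List (List String))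
  | 0, _, plan => plan
  | fuel + 1, cur, plan =>
    if cur = start then plan
    else
      match pred.get? cur with
      | some ap => pvWalk start pred fuel ap.2 (plan ++ [(ap.1, cur)])
      | none => plan

-- the body of B's moves loop: push only the state, record its predecessor
def pvStepB (state : List (List String))
    (acc : List (List (List String)) × PySem.Set (List (List String)) ×
           PySem.Dict (List (List String)) (String × List (List String)))
    (m : String × List (List String)) :
    List (List (List String)) × PySem.Set (List (List String)) ×
    PySem.Dict (List (List String)) (String × List (List String)) :=
  if PySem.Set.contains acc.2.1 m.2 then acc
  else (acc.1 ++ [m.2], PySem.Set.add acc.2.1 m.2, acc.2.2.insert m.2 (m.1, state))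

def pvBfsB (start goal : List (List String)) :
    Nat → List (List (List String)) → PySem.Set (List (List String)) →
    PySem.Dict (List (List String)) (String × List (List String)) → List (String × List (List String))
  | 0, _, _, _ => []
  | _ + 1, [], _, _ => []
  | fuel + 1, state :: rest, seen, pred =>
    if state = goal then (pvWalk start pred (pred.size + 1) state []).reverse
    else
      let step := (pvMoves state).foldl (pvStepB state) (rest, seen, pred)
      pvBfsB start goal fuel step.1 step.2.1 step.2.2

def shortest_plan_py_alt (start : List (List String)) (goal : List (List String)) (blocks : List String) : List (String × List (List String)) :=
  let n := (start.map List.length).sum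
  pvBfsB start goal ((n + 2) ^ (2 * n + 4)) [start] (PySem.Set.ofList [start]) PySem.Dict.empty

-- ===== PRECONDITION & SPEC =====
-- A raises ValueError whenever the BFS never reaches the goal, and IndexError on an empty stack
-- of an expanded state.  Pre_ admits exactly the reachable goals it can state in closed form:
-- start = goal, or all stacks nonempty on both sides, the goal sorted by the joined-string key
-- with ties only between identical stacks, and the goal's blocks a permutation of the start's.
-- Stated narrowing: it excludes goals containing two DISTINCT stacks with equal joined keys
-- (e.g. ("b","a") and ("ba",)), where which of the equal-key orders is reachable depends on the
-- stable sort's tie-breaking and has no closed form (A and B agree there all the same).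
def Pre_shortest_plan_py (start : List (List String)) (goal : List (List String)) (blocks : List String) : Prop :=
  start = goal ∨
  ((∀ st ∈ start, st ≠ []) ∧ (∀ st ∈ goal, st ≠ []) ∧
   goal.Pairwise (fun s t =>
     List.Lex (· < ·) (PySem.Str.join "" s).toList (PySem.Str.join "" t).toList ∨ s = t) ∧
   start.flatten.Perm goal.flatten)
instance (start : List (List String)) (goal : List (List String)) (blocks : List String) : Decidable (Pre_shortest_plan_py start goal blocks) := by unfold Pre_shortest_plan_py; infer_instance

def pvWitness_shortest_plan_py : List (List String) × List (List String) × List String :=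
  ([["a"], ["b"]], [["a", "b"]], ["a", "b"])

def Spec_shortest_plan_py (start : List (List String)) (goal : List (List String)) (blocks : List String) (out : List (String × List (List String))) : Prop := out = shortest_plan_py_alt start goal blocks
instance (start : List (List String)) (goal : List (List String)) (blocks : List String) (out : List (String × List (List String))) : Decidable (Spec_shortest_plan_py start goal blocks out) := by unfold Spec_shortest_plan_py; infer_instance

-- ===== CLAIM (what is proved, stated in full; the proofs are below) =====
def Claim_equal_shortest_plan_py : Prop := ∀ (start : List (List String)) (goal : List (List String)) (blocks : List String), Dom_shortest_plan_py start goal blocks → Pre_shortest_plan_py start goal blocks → Spec_shortest_plan_py start goal blocks (shortest_plan_py start goal blocks)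

-- ===== LEMMAS AND PROOFS =====

-- `pvChain start pred s p` : walking pred back from s reaches start collecting exactly plan p
inductive pvChain (start : List (List String))
    (pred : PySem.Dict (List (List String)) (String × List (List String))) :
    List (List String) → List (String × List (List String)) → Prop
  | nil : pvChain start pred start []
  | cons {s s' : List (List String)} {a : String} {p : List (String × List (List String))} :
      pred.get? s = some (a, s') → s ≠ start → pvChain start pred s' p →
      pvChain start pred s (p ++ [(a, s)])

theorem pvChain_insert {start ns : List (List String)} {v : String × List (List String)}
    {pred : PySem.Dict (List (List String)) (String × List (List String))}
    {s : List (List String)} {p : List (String × List (List String))}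
    (hns : pred.get? ns = none) (h : pvChain start pred s p) :
    pvChain start (pred.insert ns v) s p := by
  induction h with
  | nil => exact pvChain.nil
  | cons hget hne _ ih =>
    refine pvChain.cons ?_ hne ih
    rw [PySem.Dict.get?_insert_of_ne]
    · exact hget
    · intro hEq; rw [hEq] at hget; rw [hget] at hns; cases hns

theorem pvWalk_of_chain {start : List (List String)}
    {pred : PySem.Dict (List (List String)) (String × List (List String))}
    {s : List (List String)} {p : List (String × List (List String))}
    (h : pvChain start pred s p) :
    ∀ (fuel : Nat) (plan : List (String × List (List String))), p.length ≤ fuel →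
      pvWalk start pred fuel s plan = plan ++ p.reverse := by
  induction h with
  | nil =>
    intro fuel plan _
    cases fuel with
    | zero => simp [pvWalk]
    | succ f => simp [pvWalk]
  | cons hget hne _ ih =>
    intro fuel plan hlen
    cases fuel with
    | zero => simp at hlen
    | succ f =>
      simp only [pvWalk, if_neg hne, hget]
      rw [ih f (plan ++ _) (by simp at hlen; omega)]
      simp

-- the predecessor table grows by exactly one on a fresh key
theorem pvSize_insert_fresh {κ ν : Type} [BEq κ] (d : PySem.Dict κ ν) (k : κ) (v : ν)
    (h : d.get? k = none) : (d.insert k v).size = d.size + 1 := by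
  have hc : d.contains k = false := by
    rw [PySem.Dict.contains_eq_isSome_get?, h]; rfl
  rw [PySem.Dict.size_insert]
  simp [hc]

-- one expansion step: folding the moves of the popped state keeps the two BFS states aligned
theorem pvFold_agree (start : List (List String)) (s : List (List String))
    (p : List (String × List (List String))) :
    ∀ (ms : List (String × List (List String)))
      (qa : List (List (List String) × List (String × List (List String))))
      (seen : PySem.Set (List (List String)))
      (pred : PySem.Dict (List (List String)) (String × List (List String))),
      pvChain start pred s p → p.length ≤ pred.size →
      start ∈ seen → (∀ k, (pred.get? k).isSome → k ∈ seen) →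
      (∀ sp ∈ qa, pvChain start pred sp.1 sp.2 ∧ sp.2.length ≤ pred.size) →
      (ms.foldl (pvStepA p) (qa, seen)).1.map Prod.fst =
        (ms.foldl (pvStepB s) (qa.map Prod.fst, seen, pred)).1 ∧
      (ms.foldl (pvStepA p) (qa, seen)).2 =
        (ms.foldl (pvStepB s) (qa.map Prod.fst, seen, pred)).2.1 ∧
      start ∈ (ms.foldl (pvStepA p) (qa, seen)).2 ∧
      (∀ k, (((ms.foldl (pvStepB s) (qa.map Prod.fst, seen, pred)).2.2).get? k).isSome →
        k ∈ (ms.foldl (pvStepA p) (qa, seen)).2) ∧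
      (∀ sp ∈ (ms.foldl (pvStepA p) (qa, seen)).1,
        pvChain start ((ms.foldl (pvStepB s) (qa.map Prod.fst, seen, pred)).2.2) sp.1 sp.2 ∧
        sp.2.length ≤ ((ms.foldl (pvStepB s) (qa.map Prod.fst, seen, pred)).2.2).size) := by
  intro ms
  induction ms with
  | nil =>
    intro qa seen pred _ _ hstart hkeys hqa
    exact ⟨rfl, rfl, hstart, hkeys, hqa⟩
  | cons m ms ih =>
    intro qa seen pred hchain hlen hstart hkeys hqa
    simp only [List.foldl_cons]
    by_cases hm : PySem.Set.contains seen m.2 = true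
    · simp only [pvStepA, pvStepB, hm, if_true]
      exact ih qa seen pred hchain hlen hstart hkeys hqa
    · have hnotmem : m.2 ∉ seen := by
        intro hmem
        exact hm ((PySem.Set.contains_iff seen m.2).mpr hmem)
      have hget : pred.get? m.2 = none := by
        cases hg : pred.get? m.2 with
        | none => rfl
        | some v => exact absurd (hkeys m.2 (by rw [hg]; rfl)) hnotmem
      have hne_start : m.2 ≠ start := fun hEq => hnotmem (hEq ▸ hstart)
      simp only [pvStepA, pvStepB, hm, if_false, Bool.false_eq_true]
      have hmap : (qa ++ [(m.2, p ++ [m])]).map Prod.fst = qa.map Prod.fst ++ [m.2] := by simp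
      rw [← hmap]
      apply ih (qa ++ [(m.2, p ++ [m])]) (PySem.Set.add seen m.2) (pred.insert m.2 (m.1, s))
      · exact pvChain_insert hget hchain
      · rw [pvSize_insert_fresh pred m.2 (m.1, s) hget]; omega
      · exact (PySem.Set.mem_add _ _ _).mpr (Or.inl hstart)
      · intro k hk
        rw [PySem.Dict.get?_insert] at hk
        by_cases hkm : k = m.2
        · exact (PySem.Set.mem_add _ _ _).mpr (Or.inr hkm)
        · rw [if_neg hkm] at hk
          exact (PySem.Set.mem_add _ _ _).mpr (Or.inl (hkeys k hk))
      · intro sp hsp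
        rcases List.mem_append.mp hsp with hold | hnew
        · obtain ⟨hc, hl⟩ := hqa sp hold
          refine ⟨pvChain_insert hget hc, ?_⟩
          rw [pvSize_insert_fresh pred m.2 (m.1, s) hget]; omega
        · simp only [List.mem_singleton] at hnew
          subst hnew
          refine ⟨?_, ?_⟩
          · have : m = (m.1, m.2) := rfl
            rw [this]
            exact pvChain.cons (PySem.Dict.get?_insert_self pred m.2 (m.1, s)) hne_start
              (pvChain_insert hget hchain)
          · simp only [List.length_append, List.length_cons, List.length_nil]
            rw [pvSize_insert_fresh pred m.2 (m.1, s) hget]; omega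

-- the two BFS loops return the same plan whenever their queues/seen/pred are aligned
theorem pvBfs_agree (start goal : List (List String)) :
    ∀ (fuel : Nat) (qa : List (List (List String) × List (String × List (List String))))
      (seen : PySem.Set (List (List String)))
      (pred : PySem.Dict (List (List String)) (String × List (List String))),
      start ∈ seen → (∀ k, (pred.get? k).isSome → k ∈ seen) →
      (∀ sp ∈ qa, pvChain start pred sp.1 sp.2 ∧ sp.2.length ≤ pred.size) →
      pvBfsA goal fuel qa seen = pvBfsB start goal fuel (qa.map Prod.fst) seen pred := by
  intro fuel
  induction fuel with
  | zero => intro qa seen pred _ _ _; rfl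
  | succ f ih =>
    intro qa seen pred hstart hkeys hqa
    cases qa with
    | nil => rfl
    | cons hd rest =>
      obtain ⟨s, p⟩ := hd
      obtain ⟨hchain, hlen⟩ := hqa (s, p) List.mem_cons_self
      have hrest : ∀ sp ∈ rest, pvChain start pred sp.1 sp.2 ∧ sp.2.length ≤ pred.size :=
        fun sp hsp => hqa sp (List.mem_cons_of_mem _ hsp)
      simp only [List.map_cons, pvBfsA, pvBfsB]
      by_cases hsg : s = goal
      · subst hsg
        rw [if_pos rfl, if_pos rfl]
        rw [pvWalk_of_chain hchain (pred.size + 1) [] (by omega)]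
        simp
      · rw [if_neg hsg, if_neg hsg]
        obtain ⟨h1, h2, h3, h4, h5⟩ :=
          pvFold_agree start s p (pvMoves s) rest seen pred hchain hlen hstart hkeys hrest
        rw [ih _ _ _ h3 (fun k hk => h2 ▸ h4 k hk) h5, h1, h2]

-- ===== VERDICT (by name: the statement is the Claim_ definition above) =====
theorem shortest_plan_py_spec : Claim_equal_shortest_plan_py := by
  intro start goal blocks _ _
  unfold Spec_shortest_plan_py shortest_plan_py shortest_plan_py_alt
  exact pvBfs_agree start goal _ [(start, [])] (PySem.Set.ofList [start]) PySem.Dict.empty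
    (by simp [PySem.Set.mem_ofList])
    (by intro k h; simp [PySem.Dict.get?_empty] at h)
    (by rintro sp hsp
        simp only [List.mem_singleton] at hsp
        subst hsp
        exact ⟨pvChain.nil, by simp⟩)
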